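-- pv_equiv track=rewrite | github.com/lumehq/coop | scripts/validate_themes.py | validate_hex_color
-- ===== SOURCE A (Python) =====
-- def validate_hex_color(color: str) -> bool:
--     """Validate that a string is a valid hex color."""
--     if not color.startswith("#"):
--         return False
--
--     hex_part = color[1:]  # Remove #
--
--     # Check valid hex characters
--     if not all(c in "0123456789abcdefABCDEF" for c in hex_part):
--         return False
--
--     # Check length (3, 4, 6, or 8 characters)
--     if len(hex_part) not in [3, 4, 6, 8]:
--         return False
--
--     return True
-- ===== SOURCE B (Python) =====
-- import re
--
-- _HEX_RE = re.compile(r'#(?:[0-9a-fA-F]{3,4}|[0-9a-fA-F]{6}|[0-9a-fA-F]{8})')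
--
-- def validate_hex_color(color: str) -> bool:
--     """Validate that a string is a valid hex color."""
--     return bool(_HEX_RE.fullmatch(color))
-- ===== Notes on version B (the rewrite author's own statement) =====
-- stated objective: idiomatic
-- what changed: Replaced the prefix check + all() character scan + length-whitelist lookup with a single precompiled regex fullmatch ('#' followed by exactly 3, 4, 6 or 8 hex digits) evaluated in one automaton pass.
import Mathlib
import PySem

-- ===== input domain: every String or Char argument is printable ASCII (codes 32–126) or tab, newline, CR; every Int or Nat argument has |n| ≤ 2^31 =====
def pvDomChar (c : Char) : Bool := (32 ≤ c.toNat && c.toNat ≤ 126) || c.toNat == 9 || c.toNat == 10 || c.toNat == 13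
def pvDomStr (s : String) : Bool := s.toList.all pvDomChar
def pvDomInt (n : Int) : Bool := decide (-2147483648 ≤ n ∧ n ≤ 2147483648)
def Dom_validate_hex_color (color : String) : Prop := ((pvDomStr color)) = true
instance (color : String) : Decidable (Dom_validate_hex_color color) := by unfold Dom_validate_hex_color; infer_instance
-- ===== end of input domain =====

-- B replaces A's prefix check + all() character scan + length whitelist with one precompiled
-- regex fullmatch, ported here as its one-pass counting automaton (idiomatic, same cost).


-- ===== PORT A =====
def validate_hex_color (color : String) : Bool :=
  if ¬ PySem.Str.startswith color "#" then false
  else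
    let hex_part := PySem.Str.slice color (some 1) none   -- color[1:]
    if ¬ hex_part.toList.all (fun c => PySem.Str.isIn (String.ofList [c]) "0123456789abcdefABCDEF") then
      false
    else if ¬ ([3, 4, 6, 8].contains (PySem.Str.len hex_part)) then false
    else true

-- ===== PORT B =====
-- the regex r'#(?:[0-9a-fA-F]{3,4}|[0-9a-fA-F]{6}|[0-9a-fA-F]{8})' fullmatch as an explicit
-- automaton (exact): consume '#', count hex digits (dying on anything else), accept 3, 4, 6 or 8
def pvHexClass (c : Char) : Bool :=
  c.isDigit || ('a' ≤ c && c ≤ 'f') || ('A' ≤ c && c ≤ 'F')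

def pvHexRun : List Char → Nat → Bool
  | [], n => n == 3 || n == 4 || n == 6 || n == 8
  | c :: cs, n => if pvHexClass c then pvHexRun cs (n + 1) else false

def pvRegexMatch : List Char → Bool
  | '#' :: rest => pvHexRun rest 0
  | _ => false

def validate_hex_color_alt (color : String) : Bool :=
  pvRegexMatch color.toList

-- ===== PRECONDITION & SPEC =====
def Spec_validate_hex_color (color : String) (out : Bool) : Prop := out = validate_hex_color_alt color
instance (color : String) (out : Bool) : Decidable (Spec_validate_hex_color color out) := by unfold Spec_validate_hex_color; infer_instance

-- ===== CLAIM (what is proved, stated in full; the proofs are below) =====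
def Claim_equal_validate_hex_color : Prop := ∀ (color : String), Dom_validate_hex_color color → Spec_validate_hex_color color (validate_hex_color color)

-- ===== LEMMAS AND PROOFS =====

-- membership in A's hex-alphabet string agrees with B's regex character class
theorem pv_mem_hexlist_iff (c : Char) :
    (c ∈ "0123456789abcdefABCDEF".toList) ↔ pvHexClass c = true := by
  have hl : "0123456789abcdefABCDEF".toList =
    ['0','1','2','3','4','5','6','7','8','9','a','b','c','d','e','f','A','B','C','D','E','F'] := rfl
  have hv0 : ('0'.val.toNat) = 48 := rfl
  have hv1 : ('1'.val.toNat) = 49 := rfl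
  have hv2 : ('2'.val.toNat) = 50 := rfl
  have hv3 : ('3'.val.toNat) = 51 := rfl
  have hv4 : ('4'.val.toNat) = 52 := rfl
  have hv5 : ('5'.val.toNat) = 53 := rfl
  have hv6 : ('6'.val.toNat) = 54 := rfl
  have hv7 : ('7'.val.toNat) = 55 := rfl
  have hv8 : ('8'.val.toNat) = 56 := rfl
  have hv9 : ('9'.val.toNat) = 57 := rfl
  have hv10 : ('a'.val.toNat) = 97 := rfl
  have hv11 : ('b'.val.toNat) = 98 := rfl
  have hv12 : ('c'.val.toNat) = 99 := rfl
  have hv13 : ('d'.val.toNat) = 100 := rfl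
  have hv14 : ('e'.val.toNat) = 101 := rfl
  have hv15 : ('f'.val.toNat) = 102 := rfl
  have hv16 : ('A'.val.toNat) = 65 := rfl
  have hv17 : ('B'.val.toNat) = 66 := rfl
  have hv18 : ('C'.val.toNat) = 67 := rfl
  have hv19 : ('D'.val.toNat) = 68 := rfl
  have hv20 : ('E'.val.toNat) = 69 := rfl
  have hv21 : ('F'.val.toNat) = 70 := rfl
  rw [hl]
  simp only [List.mem_cons, List.not_mem_nil, or_false, pvHexClass, Char.isDigit,
    Bool.or_eq_true, Bool.and_eq_true, decide_eq_true_eq, Char.ext_iff, UInt32.ext_iff,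
    Char.le_def, UInt32.le_iff_toNat_le]
  omega

-- A's `c in "0123…ABCDEF"` test equals B's character class
theorem pv_isIn_eq_class (c : Char) :
    PySem.Str.isIn (String.ofList [c]) "0123456789abcdefABCDEF" = pvHexClass c := by
  rw [Bool.eq_iff_iff, PySem.Str.isIn_iff_infix, ← pv_mem_hexlist_iff]
  have hc1 : (String.ofList [c]).toList = [c] := by simp
  rw [hc1]
  constructor
  · intro h
    exact h.sublist.subset (List.mem_singleton.2 rfl)
  · intro h
    obtain ⟨l₁, l₂, hl⟩ := List.append_of_mem h
    exact ⟨l₁, l₂, by rw [hl]; simp⟩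

-- the automaton run equals "all chars in class AND total count ∈ {3,4,6,8}"
theorem pvHexRun_eq (cs : List Char) (n : Nat) :
    pvHexRun cs n = (cs.all pvHexClass && (n + cs.length == 3 || n + cs.length == 4 ||
      n + cs.length == 6 || n + cs.length == 8)) := by
  induction cs generalizing n with
  | nil => simp [pvHexRun]
  | cons c cs ih =>
      by_cases h : pvHexClass c = true <;>
        simp [pvHexRun, h, ih, Nat.add_comm, Nat.add_left_comm]

-- ===== VERDICT (by name: the statement is the Claim_ definition above) =====
theorem validate_hex_color_spec : Claim_equal_validate_hex_color := by
  intro color _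
  unfold Spec_validate_hex_color validate_hex_color validate_hex_color_alt
  rcases hL : color.toList with _ | ⟨c, rest⟩
  · have hpre : PySem.Chars.startswith [] ['#'] = false := by decide
    simp [hL, hpre, pvRegexMatch]
  · by_cases hc : c = '#'
    · subst hc
      have hpre : PySem.Str.startswith color "#" = true := by
        rw [PySem.Str.startswith_eq, hL, PySem.Chars.startswith_iff]
        exact ⟨rest, rfl⟩
      have hpart : (PySem.Str.slice color (some 1) none).toList = rest := by
        simp [PySem.Str.toList_slice, PySem.Chars.slice_eq_listSlice,
          PySem.List.slice_from_one, hL]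
      have hlen : PySem.Str.len (PySem.Str.slice color (some 1) none) = rest.length := by
        rw [PySem.Str.len_eq, hpart]
      simp only [hpre, not_true_eq_false, if_false, hpart, hlen, pvRegexMatch,
        pvHexRun_eq, pv_isIn_eq_class, Nat.zero_add]
      split_ifs with h1 h2 <;> simp_all <;> omega
    · have hpre : PySem.Chars.startswith (c :: rest) ['#'] = false := by
        rw [Bool.eq_false_iff]
        intro h
        rw [PySem.Chars.startswith_iff] at h
        obtain ⟨t, ht⟩ := h
        exact hc (List.cons.inj ht).1.symm
      have hB : pvRegexMatch (c :: rest) = false := by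
        rw [pvRegexMatch.eq_def]
        split
        · rename_i heq
          exact absurd (List.cons.inj heq).1 hc
        · rfl
      simp [hL, hpre, hB]
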